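-- pv_equiv track=rewrite | github.com/SachaYT1/repetitor | Ренаточка/5/kege/20.py | multiplyDigits
-- ===== SOURCE A (Python) =====
-- def multiplyDigits(n, m):
--     evenDigits = []
--     oddDigits = []
--     for digit in str(n):
--         if int(digit) % 2 == 0:
--             evenDigits.append(int(digit))
--         else:
--             oddDigits.append(int(digit))
--     for digit in str(m):
--         if int(digit) % 2 == 0:
--             evenDigits.append(int(digit))
--         else:
--             oddDigits.append(int(digit))
--     p1 = 1
--     p2 = 1
--     for i in evenDigits:
--         if i != 0:
--             p1 *= i
--     for i in oddDigits:
--         if i != 0: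
--             p2 *= i
--     return abs(p1 - p2)
-- ===== SOURCE B (Python) =====
-- def multiplyDigits(n, m):
--     def prods(k):
--         d = k % 10
--         pe, po = (1, 1) if k < 10 else prods(k // 10)
--         if d % 2 == 0:
--             return (pe * d, po) if d != 0 else (pe, po)
--         return (pe, po * d)
--     pe1, po1 = prods(n)
--     pe2, po2 = prods(m)
--     return abs(pe1 * pe2 - po1 * po2)
-- ===== Notes on version B (the rewrite author's own statement) =====
-- stated objective: alternative
-- what changed: B extracts digits arithmetically by recursion on k % 10 / k // 10 (no str() and no lists) and combines the two numbers' even/odd products by multiplication, instead of A's string conversion, list partitioning and separate product loops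
import Mathlib
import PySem

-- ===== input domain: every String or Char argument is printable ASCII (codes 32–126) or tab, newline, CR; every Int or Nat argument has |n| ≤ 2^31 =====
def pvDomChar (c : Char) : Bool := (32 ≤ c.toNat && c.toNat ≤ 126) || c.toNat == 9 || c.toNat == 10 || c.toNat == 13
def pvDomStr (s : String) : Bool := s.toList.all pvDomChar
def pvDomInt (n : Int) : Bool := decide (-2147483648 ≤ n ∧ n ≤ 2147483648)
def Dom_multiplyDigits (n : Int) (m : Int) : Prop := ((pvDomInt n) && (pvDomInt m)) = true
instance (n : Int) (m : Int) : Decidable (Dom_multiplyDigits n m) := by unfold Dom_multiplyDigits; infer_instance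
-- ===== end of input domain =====

-- B extracts digits arithmetically by recursion on k % 10 / k // 10 (no str(), no lists)
-- and combines the two numbers' even/odd products by multiplication (objective: alternative).


-- ===== PORT A =====
-- int(digit) for a single char: exact when the char is '0'..'9' (Pre_ guarantees n, m ≥ 0,
-- so str(n)/str(m) consist of digit chars only).
def pvDigitVal (c : Char) : Int := (c.toNat : Int) - 48

-- one step of A's partition loops: append int(digit) to evenDigits or oddDigits
def pvPartStep (s : List Int × List Int) (c : Char) : List Int × List Int :=
  if PySem.Int.mod (pvDigitVal c) 2 = 0 then (s.1 ++ [pvDigitVal c], s.2)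
  else (s.1, s.2 ++ [pvDigitVal c])

-- 'for i in l: if i != 0: p *= i'
def pvProd (p : Int) (l : List Int) : Int :=
  l.foldl (fun p i => if i ≠ 0 then p * i else p) p

def multiplyDigits (n : Int) (m : Int) : Int :=
  let s1 := (PySem.Int.toChars n).foldl pvPartStep ([], [])
  let s2 := (PySem.Int.toChars m).foldl pvPartStep s1
  let p1 := pvProd 1 s2.1
  let p2 := pvProd 1 s2.2
  |p1 - p2|

-- ===== PORT B =====
-- Source B's prods(k): recursion on k // 10, digit d = k % 10 multiplied into the even or odd
-- product.  Defined on Nat (Pre_ gives k ≥ 0, where Python's % and // agree with Nat's).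
def pvProds (k : Nat) : Int × Int :=
  let d : Int := ((k % 10 : Nat) : Int)
  let p : Int × Int := if k < 10 then (1, 1) else pvProds (k / 10)
  if PySem.Int.mod d 2 = 0 then (if d ≠ 0 then (p.1 * d, p.2) else p)
  else (p.1, p.2 * d)
decreasing_by exact Nat.div_lt_self (by omega) (by omega)

def multiplyDigits_alt (n : Int) (m : Int) : Int :=
  let r1 := pvProds n.toNat
  let r2 := pvProds m.toNat
  |r1.1 * r2.1 - r1.2 * r2.2|

-- ===== PRECONDITION & SPEC =====
-- Pre_ excludes n < 0 or m < 0: there str() yields a '-' character and int('-') raises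
-- ValueError in Python A.
def Pre_multiplyDigits (n : Int) (m : Int) : Prop := 0 ≤ n ∧ 0 ≤ m
instance (n : Int) (m : Int) : Decidable (Pre_multiplyDigits n m) := by unfold Pre_multiplyDigits; infer_instance
def pvWitness_multiplyDigits : Int × Int := (123, 456)

def Spec_multiplyDigits (n : Int) (m : Int) (out : Int) : Prop := out = multiplyDigits_alt n m
instance (n : Int) (m : Int) (out : Int) : Decidable (Spec_multiplyDigits n m out) := by unfold Spec_multiplyDigits; infer_instance

-- ===== CLAIM (what is proved, stated in full; the proofs are below) =====
def Claim_equal_multiplyDigits : Prop := ∀ (n : Int) (m : Int), Dom_multiplyDigits n m → Pre_multiplyDigits n m → Spec_multiplyDigits n m (multiplyDigits n m)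

-- ===== LEMMAS AND PROOFS =====

-- toDigitsCore only prepends to its accumulator
lemma pvTdcAcc (f : Nat) : ∀ (n : Nat) (ds : List Char),
    Nat.toDigitsCore 10 f n ds = Nat.toDigitsCore 10 f n [] ++ ds := by
  induction f with
  | zero => intro n ds; simp [Nat.toDigitsCore]
  | succ f ih =>
    intro n ds
    simp only [Nat.toDigitsCore]
    by_cases h : n / 10 = 0
    · simp [h]
    · simp only [if_neg h]
      rw [ih (n / 10) ((n % 10).digitChar :: ds), ih (n / 10) [(n % 10).digitChar]]
      simp

-- toDigitsCore is fuel-independent once the fuel exceeds the number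
lemma pvTdcFuel (n : Nat) : ∀ (f₁ f₂ : Nat), n < f₁ → n < f₂ → ∀ ds,
    Nat.toDigitsCore 10 f₁ n ds = Nat.toDigitsCore 10 f₂ n ds := by
  induction n using Nat.strong_induction_on with
  | _ n ih =>
    intro f₁ f₂ h₁ h₂ ds
    obtain ⟨g₁, rfl⟩ : ∃ g, f₁ = g + 1 := ⟨f₁ - 1, by omega⟩
    obtain ⟨g₂, rfl⟩ : ∃ g, f₂ = g + 1 := ⟨f₂ - 1, by omega⟩
    simp only [Nat.toDigitsCore]
    by_cases h : n / 10 = 0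
    · simp [h]
    · have hn : 10 ≤ n := by
        by_contra hc; exact h (Nat.div_eq_of_lt (by omega))
      have hlt : n / 10 < n := Nat.div_lt_self (by omega) (by omega)
      simp only [if_neg h]
      exact ih (n / 10) hlt g₁ g₂ (by omega) (by omega) _

-- peeling the last digit off Nat.toDigits
lemma pvToDigits_step (n : Nat) (hn : 10 ≤ n) :
    Nat.toDigits 10 n = Nat.toDigits 10 (n / 10) ++ [(n % 10).digitChar] := by
  have h : n / 10 ≠ 0 := by
    intro h0; have := Nat.div_eq_of_lt (a := n) (b := 10); omega
  show Nat.toDigitsCore 10 (n + 1) n [] = _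
  simp only [Nat.toDigitsCore, if_neg h]
  rw [pvTdcAcc n (n / 10) [(n % 10).digitChar],
      pvTdcFuel (n / 10) n (n / 10 + 1) (by omega) (by omega) []]
  rfl

lemma pvToDigits_base (n : Nat) (hn : n < 10) :
    Nat.toDigits 10 n = [n.digitChar] := by
  have h : n / 10 = 0 := Nat.div_eq_of_lt hn
  show Nat.toDigitsCore 10 (n + 1) n [] = _
  simp only [Nat.toDigitsCore, if_pos h]
  rw [Nat.mod_eq_of_lt hn]

lemma pvDigitVal_digitChar (d : Nat) (hd : d < 10) :
    pvDigitVal d.digitChar = (d : Int) := by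
  interval_cases d <;> decide

-- A's partition loop appends the even/odd digit values to the two accumulators
lemma pvPartStep_foldl (cs : List Char) (ev od : List Int) :
    cs.foldl pvPartStep (ev, od) =
      (ev ++ (cs.map pvDigitVal).filter (fun d => decide (PySem.Int.mod d 2 = 0)),
       od ++ (cs.map pvDigitVal).filter (fun d => ¬ decide (PySem.Int.mod d 2 = 0))) := by
  induction cs generalizing ev od with
  | nil => simp
  | cons c cs ih =>
    simp only [List.foldl_cons, List.map_cons, List.filter_cons, pvPartStep]
    by_cases h : (2 : Int) ∣ pvDigitVal c <;>
      simp [h, ih, List.append_assoc]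

lemma pvProd_append (p : Int) (l₁ l₂ : List Int) :
    pvProd p (l₁ ++ l₂) = pvProd (pvProd p l₁) l₂ := by
  simp [pvProd, List.foldl_append]

lemma pvProd_mul (l : List Int) : ∀ (p : Int), pvProd p l = p * pvProd 1 l := by
  induction l with
  | nil => intro p; simp [pvProd]
  | cons x xs ih =>
    intro p
    by_cases h : x = 0
    · have h1 := ih p
      simp only [pvProd, List.foldl_cons] at h1 ⊢
      simpa [h] using h1
    · have h1 := ih (p * x)
      have h2 := ih (1 * x)
      simp only [pvProd, List.foldl_cons] at h1 h2 ⊢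
      simp only [h, ne_eq, not_false_iff, if_true]
      rw [h1, h2]; ring

-- the digit values of str(k), as A sees them
def pvDl (k : Nat) : List Int := (Nat.toDigits 10 k).map pvDigitVal

-- the key invariant: A's two filtered products over str(k) are exactly B's prods(k)
lemma pvProds_eq (k : Nat) :
    pvProd 1 ((pvDl k).filter (fun d => decide (PySem.Int.mod d 2 = 0))) = (pvProds k).1 ∧
    pvProd 1 ((pvDl k).filter (fun d => ¬ decide (PySem.Int.mod d 2 = 0))) = (pvProds k).2 := by
  induction k using Nat.strong_induction_on with
  | _ k ih =>
    by_cases hk : k < 10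
    · have hmod : k % 10 = k := Nat.mod_eq_of_lt hk
      rw [pvProds]
      simp only [pvDl, pvToDigits_base k hk, List.map_cons, List.map_nil,
        pvDigitVal_digitChar k hk, hmod, if_pos hk]
      by_cases he : (2 : Int) ∣ (k : Int)
      · by_cases hz : k = 0 <;>
          simp [List.filter, he, hz, pvProd]
      · have hz : k ≠ 0 := fun e => he (by simp [e])
        simp [List.filter, he, hz, pvProd]
    · have hlt : k / 10 < k := Nat.div_lt_self (by omega) (by omega)
      obtain ⟨ihe, iho⟩ := ih (k / 10) hlt
      have hd10 : k % 10 < 10 := Nat.mod_lt _ (by omega)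
      have hdl : pvDl k = pvDl (k / 10) ++ [((k % 10 : Nat) : Int)] := by
        rw [pvDl, pvToDigits_step k (by omega), List.map_append, pvDl]
        simp [pvDigitVal_digitChar _ hd10]
      rw [pvProds, hdl]
      simp only [List.filter_append, pvProd_append, if_neg hk, ihe, iho]
      have hone : ∀ (P d : Int), pvProd P [d] = if d ≠ 0 then P * d else P := fun P d => rfl
      have hnil : ∀ (P : Int), pvProd P ([] : List Int) = P := fun P => rfl
      by_cases he : PySem.Int.mod ((k % 10 : Nat) : Int) 2 = 0
      · have hb : (decide (PySem.Int.mod ((k % 10 : Nat) : Int) 2 = 0)) = true :=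
          decide_eq_true he
        have hfe : List.filter (fun d => decide (PySem.Int.mod d 2 = 0))
            [((k % 10 : Nat) : Int)] = [((k % 10 : Nat) : Int)] := by
          rw [List.filter_cons, if_pos hb, List.filter_nil]
        have hfo : List.filter (fun d => ¬ decide (PySem.Int.mod d 2 = 0))
            [((k % 10 : Nat) : Int)] = ([] : List Int) := by
          rw [List.filter_cons]
          rw [if_neg (by rw [hb]; decide), List.filter_nil]
        rw [hfe, hfo, if_pos he, hone, hnil]
        by_cases hz : ((k % 10 : Nat) : Int) = 0
        · rw [if_neg (by simpa using hz), if_neg (by simpa using hz)]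
          exact ⟨rfl, rfl⟩
        · rw [if_pos hz, if_pos hz]
          exact ⟨rfl, rfl⟩
      · have hb : (decide (PySem.Int.mod ((k % 10 : Nat) : Int) 2 = 0)) = false :=
          decide_eq_false he
        have hfe : List.filter (fun d => decide (PySem.Int.mod d 2 = 0))
            [((k % 10 : Nat) : Int)] = ([] : List Int) := by
          rw [List.filter_cons, if_neg (by rw [hb]; decide), List.filter_nil]
        have hfo : List.filter (fun d => ¬ decide (PySem.Int.mod d 2 = 0))
            [((k % 10 : Nat) : Int)] = [((k % 10 : Nat) : Int)] := by
          rw [List.filter_cons]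
          rw [if_pos (by rw [hb]; decide), List.filter_nil]
        have hz' : ((k % 10 : Nat) : Int) ≠ 0 := by
          intro e
          exact he (by rw [e]; decide)
        rw [hfe, hfo, if_neg he, hone, hnil, if_pos hz']
        exact ⟨rfl, rfl⟩

-- ===== VERDICT (by name: the statement is the Claim_ definition above) =====
theorem multiplyDigits_spec : Claim_equal_multiplyDigits := by
  intro n m _ hpre
  obtain ⟨hn, hm⟩ := hpre
  show multiplyDigits n m = multiplyDigits_alt n m
  have htn : PySem.Int.toChars n = Nat.toDigits 10 n.toNat := by
    simp [PySem.Int.toChars, not_lt.mpr hn]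
  have htm : PySem.Int.toChars m = Nat.toDigits 10 m.toNat := by
    simp [PySem.Int.toChars, not_lt.mpr hm]
  obtain ⟨hen, hon⟩ := pvProds_eq n.toNat
  obtain ⟨hem, hom⟩ := pvProds_eq m.toNat
  simp only [pvDl] at hen hon hem hom
  simp only [multiplyDigits, multiplyDigits_alt, htn, htm, pvPartStep_foldl,
    List.nil_append]
  rw [pvProd_append, pvProd_append, pvProd_mul _ (pvProd 1 _),
    pvProd_mul _ (pvProd 1 _), hen, hem, hon, hom]
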